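-- pv_equiv track=rewrite | github.com/unitaryfund/aquapointer | aquapointer/density_canvas/Lp_norm.py | partition_eqclasses_size
-- ===== SOURCE A (Python) =====
-- def partition_eqclasses_size(r):
--     """Calculates the equivalence classes and returns their size.
--     The equivalence relation is r_i ~ r_j iff r_i = r_j"""
--     res = []
--     placed = []
--     for i in range(len(r)):
--         if i in placed:
--             continue
--         eqclass_i = [r[i]]
--         placed.append(i)
--         for j in range(i+1, len(r)):
--             if j in placed:
--                 continue
--             if r[j] == r[i]:
--                 eqclass_i.append(r[j])
--                 placed.append(j)
--         res.append(eqclass_i)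
--     return [len(eq) for eq in res]
-- ===== SOURCE B (Python) =====
-- def partition_eqclasses_size(r):
--     """Calculates the equivalence classes and returns their size.
--     The equivalence relation is r_i ~ r_j iff r_i = r_j"""
--     counts = {}
--     for x in r:
--         counts[x] = counts.get(x, 0) + 1
--     return list(counts.values())
-- ===== Notes on version B (the rewrite author's own statement) =====
-- stated objective: faster
-- what changed: Replaces the nested index scans with a 'placed' index list by a single pass that tallies each value in an insertion-ordered dict and returns its values, giving class sizes in first-appearance order directly.
import Mathlib
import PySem

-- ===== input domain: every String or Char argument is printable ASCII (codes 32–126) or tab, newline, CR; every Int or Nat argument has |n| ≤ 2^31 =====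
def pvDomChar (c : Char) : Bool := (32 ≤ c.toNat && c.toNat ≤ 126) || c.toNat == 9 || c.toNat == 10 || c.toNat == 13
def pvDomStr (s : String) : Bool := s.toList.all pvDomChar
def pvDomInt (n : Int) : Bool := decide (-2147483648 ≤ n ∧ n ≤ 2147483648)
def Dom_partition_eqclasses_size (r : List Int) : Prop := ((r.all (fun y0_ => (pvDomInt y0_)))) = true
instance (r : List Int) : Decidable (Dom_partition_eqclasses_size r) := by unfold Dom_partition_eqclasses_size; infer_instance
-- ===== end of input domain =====

-- B replaces A's nested index scans over a 'placed' list by one counting-dict pass (sizes in first-appearance order).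

-- ===== PORT A =====
-- literal transliteration of A: outer loop over range(len(r)), 'placed' index list,
-- inner loop over range(i+1, len(r)) collecting equal elements, then [len(eq) for eq in res]
def partition_eqclasses_size (r : List Int) : List Int :=
  let st := (PySem.List.pyRange 0 (r.length : Int) 1).foldl
    (fun (st : List (List Int) × List Int) i =>
      if st.2.contains i then st
      else
        let ri := PySem.List.pyGetD r i 0   -- r[i]; i is always in range here
        let st2 := (PySem.List.pyRange (i+1) (r.length : Int) 1).foldl
          (fun (st2 : List Int × List Int) j =>
            if st2.2.contains j then st2
            else if PySem.List.pyGetD r j 0 == ri then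
              (st2.1 ++ [PySem.List.pyGetD r j 0], st2.2 ++ [j])
            else st2)
          ([ri], st.2 ++ [i])
        (st.1 ++ [st2.1], st2.2))
    ([], [])
  st.1.map (fun eq => (eq.length : Int))

-- ===== PORT B =====
-- literal transliteration of B: counts = {}; for x in r: counts[x] = counts.get(x,0)+1; return list(counts.values())
def partition_eqclasses_size_alt (r : List Int) : List Int :=
  let counts := r.foldl (fun (d : PySem.Dict Int Int) x => d.insert x (d.getD x 0 + 1)) PySem.Dict.empty
  counts.values

-- ===== PRECONDITION & SPEC =====
def Spec_partition_eqclasses_size (r : List Int) (out : List Int) : Prop := out = partition_eqclasses_size_alt r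
instance (r : List Int) (out : List Int) : Decidable (Spec_partition_eqclasses_size r out) := by unfold Spec_partition_eqclasses_size; infer_instance

-- ===== CLAIM (what is proved, stated in full; the proofs are below) =====
def Claim_equal_partition_eqclasses_size : Prop := ∀ (r : List Int), Dom_partition_eqclasses_size r → Spec_partition_eqclasses_size r (partition_eqclasses_size r)

-- ===== LEMMAS AND PROOFS =====

-- B's side: the counting dict's values are the multiplicities of the distinct values in first-appearance order.
theorem alt_eq_spec (r : List Int) :
    partition_eqclasses_size_alt r
      = (PySem.Set.ofList r).map (fun v => (r.count v : Int)) := by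
  unfold partition_eqclasses_size_alt
  rw [PySem.Dict.foldl_insert_getD_add_one_eq_counter]
  show (PySem.Dict.counter r).items.map (·.2) = _
  rw [PySem.Dict.items_counter]
  simp

-- A's inner loop body, as a named function (definitionally the lambda of the port).
def pvInner (r : List Int) (ri : Int) (st2 : List Int × List Int) (j : Int) : List Int × List Int :=
  if st2.2.contains j then st2
  else if PySem.List.pyGetD r j 0 == ri then
    (st2.1 ++ [PySem.List.pyGetD r j 0], st2.2 ++ [j])
  else st2

-- A's outer loop body.
def pvOuter (r : List Int) (st : List (List Int) × List Int) (i : Int) : List (List Int) × List Int :=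
  if st.2.contains i then st
  else
    let ri := PySem.List.pyGetD r i 0
    let st2 := (PySem.List.pyRange (i+1) (r.length : Int) 1).foldl (pvInner r ri) ([ri], st.2 ++ [i])
    (st.1 ++ [st2.1], st2.2)

-- Invariant for the 'placed' list before outer step t: index j is placed iff its value occurs before position t.
def pvInv (r : List Int) (t : Nat) (pl : List Int) : Prop :=
  ∀ jn : Nat, pl.contains (jn : Int) = true ↔ (jn < r.length ∧ r.getD jn 0 ∈ r.take t)


theorem pvInner_skip (r : List Int) (ri : Int) (st2 : List Int × List Int) (j : Int)
    (h : st2.2.contains j = true) : pvInner r ri st2 j = st2 := by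
  unfold pvInner; rw [if_pos h]

theorem pvInner_take (r : List Int) (ri : Int) (st2 : List Int × List Int) (j : Int)
    (h : st2.2.contains j = false) (hv : PySem.List.pyGetD r j 0 = ri) :
    pvInner r ri st2 j = (st2.1 ++ [PySem.List.pyGetD r j 0], st2.2 ++ [j]) := by
  unfold pvInner; rw [if_neg (by rw [h]; exact Bool.false_ne_true), if_pos (by rw [hv]; exact beq_self_eq_true ri)]

theorem pvInner_pass (r : List Int) (ri : Int) (st2 : List Int × List Int) (j : Int)
    (h : st2.2.contains j = false) (hv : PySem.List.pyGetD r j 0 ≠ ri) :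
    pvInner r ri st2 j = st2 := by
  unfold pvInner; rw [if_neg (by rw [h]; exact Bool.false_ne_true), if_neg (by simp [beq_iff_eq, hv])]

theorem pvOuter_skip (r : List Int) (st : List (List Int) × List Int) (i : Int)
    (h : st.2.contains i = true) : pvOuter r st i = st := by
  unfold pvOuter; rw [if_pos h]

theorem pvOuter_go (r : List Int) (st : List (List Int) × List Int) (i : Int)
    (h : st.2.contains i = false) :
    pvOuter r st i =
      (st.1 ++ [((PySem.List.pyRange (i+1) (r.length : Int) 1).foldl
          (pvInner r (PySem.List.pyGetD r i 0)) ([PySem.List.pyGetD r i 0], st.2 ++ [i])).1],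
       ((PySem.List.pyRange (i+1) (r.length : Int) 1).foldl
          (pvInner r (PySem.List.pyGetD r i 0)) ([PySem.List.pyGetD r i 0], st.2 ++ [i])).2) := by
  unfold pvOuter; rw [if_neg (by rw [h]; exact Bool.false_ne_true)]

-- The inner loop from position m2 appends to eq exactly the occurrences of ri in r.drop m2,
-- and marks them placed.
theorem pvInnerLem (r : List Int) (ri : Int) (i : Nat)
    (hfo : ri ∉ r.take i) :
    ∀ (fuel m2 : Nat), r.length = m2 + fuel → i < m2 → ∀ (eq pl : List Int),
    (∀ jn : Nat, pl.contains (jn : Int) = true ↔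
        (jn < r.length ∧ (r.getD jn 0 ∈ r.take i ∨ jn = i ∨ (i < jn ∧ jn < m2 ∧ r.getD jn 0 = ri)))) →
    (((PySem.List.pyRange (m2 : Int) (r.length : Int) 1).foldl (pvInner r ri) (eq, pl)).1.length
        = eq.length + (r.drop m2).count ri)
    ∧ (∀ jn : Nat,
        ((PySem.List.pyRange (m2 : Int) (r.length : Int) 1).foldl (pvInner r ri) (eq, pl)).2.contains (jn : Int) = true ↔
        (jn < r.length ∧ (r.getD jn 0 ∈ r.take i ∨ jn = i ∨ (i < jn ∧ jn < r.length ∧ r.getD jn 0 = ri)))) := by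
  intro fuel
  induction fuel with
  | zero =>
    intro m2 hlen him eq pl hpl
    have hm2 : m2 = r.length := by omega
    rw [PySem.List.pyRange_one_eq_nil (by exact_mod_cast hm2.ge)]
    subst hm2
    simp only [List.foldl_nil, List.drop_length, List.count_nil]
    exact ⟨by omega, hpl⟩

  | succ fuel ih =>
    intro m2 hlen him eq pl hpl
    have hm2 : m2 < r.length := by omega
    rw [PySem.List.pyRange_one_cons (by exact_mod_cast hm2)]
    rw [List.foldl_cons]
    have hcast : ((m2 : Int) + 1) = (((m2 + 1 : Nat)) : Int) := by push_cast; ring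
    rw [hcast]
    have hdrop : r.drop m2 = r[m2] :: r.drop (m2 + 1) := List.drop_eq_getElem_cons hm2
    have hgd : r.getD m2 0 = r[m2] := List.getD_eq_getElem r 0 hm2
    by_cases hmem : r.getD m2 0 ∈ r.take i
    · -- already placed, skipped (its value occurred before i)
      have hne : r.getD m2 0 ≠ ri := fun h => hfo (h ▸ hmem)
      have hc : pl.contains (m2 : Int) = true := (hpl m2).2 ⟨hm2, Or.inl hmem⟩
      rw [pvInner_skip r ri (eq, pl) (m2 : Int) hc]
      have hpl' : ∀ jn : Nat, pl.contains (jn : Int) = true ↔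
          (jn < r.length ∧ (r.getD jn 0 ∈ r.take i ∨ jn = i ∨ (i < jn ∧ jn < m2 + 1 ∧ r.getD jn 0 = ri))) := by
        intro jn
        rw [hpl jn]
        constructor
        · rintro ⟨h1, h2⟩; exact ⟨h1, by rcases h2 with h | h | ⟨a, b, c⟩; exacts [Or.inl h, Or.inr (Or.inl h), Or.inr (Or.inr ⟨a, by omega, c⟩)]⟩
        · rintro ⟨h1, h2⟩
          refine ⟨h1, ?_⟩
          rcases h2 with h | h | ⟨a, b, c⟩
          · exact Or.inl h
          · exact Or.inr (Or.inl h)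
          · rcases Nat.lt_or_ge jn m2 with hlt | hge
            · exact Or.inr (Or.inr ⟨a, hlt, c⟩)
            · have hjm : jn = m2 := by omega
              rw [hjm] at c
              exact absurd c hne
      obtain ⟨h1, h2⟩ := ih (m2 + 1) (by omega) (by omega) eq pl hpl'
      refine ⟨?_, h2⟩
      rw [h1, hdrop, List.count_cons]
      have : (r[m2] == ri) = false := by simp only [beq_eq_false_iff_ne, ne_eq]; exact hgd ▸ hne
      rw [this]
      simp
    · -- not placed
      have hc : pl.contains (m2 : Int) = false := by
        rw [Bool.eq_false_iff]
        intro h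
        rcases (hpl m2).1 h with ⟨_, hh | hh | ⟨a, b, c⟩⟩
        · exact hmem hh
        · omega
        · omega
      by_cases hv : r.getD m2 0 = ri
      · -- same value: collected into the class and placed
        have hvv : PySem.List.pyGetD r ((m2 : Nat) : Int) 0 = ri := by
          rw [PySem.List.pyGetD_natCast]; exact hv
        rw [pvInner_take r ri (eq, pl) (m2 : Int) hc hvv]
        have hpl' : ∀ jn : Nat, (pl ++ [(m2 : Int)]).contains (jn : Int) = true ↔
            (jn < r.length ∧ (r.getD jn 0 ∈ r.take i ∨ jn = i ∨ (i < jn ∧ jn < m2 + 1 ∧ r.getD jn 0 = ri))) := by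
          intro jn
          simp only [List.contains_append, List.contains_cons, List.contains_nil,
            Bool.or_false, Bool.or_eq_true, beq_iff_eq, Nat.cast_inj, hpl jn]
          constructor
          · rintro (⟨h1, h2⟩ | h)
            · exact ⟨h1, by rcases h2 with h | h | ⟨a, b, c⟩; exacts [Or.inl h, Or.inr (Or.inl h), Or.inr (Or.inr ⟨a, by omega, c⟩)]⟩
            · subst h
              exact ⟨hm2, Or.inr (Or.inr ⟨him, by omega, hv⟩)⟩
          · rintro ⟨h1, h | h | ⟨a, b, c⟩⟩
            · exact Or.inl ⟨h1, Or.inl h⟩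
            · exact Or.inl ⟨h1, Or.inr (Or.inl h)⟩
            · rcases Nat.lt_or_ge jn m2 with hlt | hge
              · exact Or.inl ⟨h1, Or.inr (Or.inr ⟨a, hlt, c⟩)⟩
              · exact Or.inr (by omega)
        obtain ⟨h1, h2⟩ := ih (m2 + 1) (by omega) (by omega) _ _ hpl'
        refine ⟨?_, h2⟩
        rw [h1, hdrop, List.count_cons]
        have : (r[m2] == ri) = true := by rw [beq_iff_eq, ← hgd]; exact hv
        rw [this]
        simp only [List.length_append, List.length_singleton, if_true]
        omega
      · -- different value: skipped
        have hvv : PySem.List.pyGetD r ((m2 : Nat) : Int) 0 ≠ ri := by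
          rw [PySem.List.pyGetD_natCast]; exact hv
        rw [pvInner_pass r ri (eq, pl) (m2 : Int) hc hvv]
        have hpl' : ∀ jn : Nat, pl.contains (jn : Int) = true ↔
            (jn < r.length ∧ (r.getD jn 0 ∈ r.take i ∨ jn = i ∨ (i < jn ∧ jn < m2 + 1 ∧ r.getD jn 0 = ri))) := by
          intro jn
          rw [hpl jn]
          constructor
          · rintro ⟨h1, h2⟩; exact ⟨h1, by rcases h2 with h | h | ⟨a, b, c⟩; exacts [Or.inl h, Or.inr (Or.inl h), Or.inr (Or.inr ⟨a, by omega, c⟩)]⟩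
          · rintro ⟨h1, h | h | ⟨a, b, c⟩⟩
            · exact ⟨h1, Or.inl h⟩
            · exact ⟨h1, Or.inr (Or.inl h)⟩
            · rcases Nat.lt_or_ge jn m2 with hlt | hge
              · exact ⟨h1, Or.inr (Or.inr ⟨a, hlt, c⟩)⟩
              · have hjm : jn = m2 := by omega
                rw [hjm] at c
                exact absurd c hv
        obtain ⟨h1, h2⟩ := ih (m2 + 1) (by omega) (by omega) eq pl hpl'
        refine ⟨?_, h2⟩
        rw [h1, hdrop, List.count_cons]
        have : (r[m2] == ri) = false := by simp only [beq_eq_false_iff_ne, ne_eq]; exact hgd ▸ hv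
        rw [this]
        simp

-- The outer loop from position i produces one class of the full multiplicity per first occurrence.
theorem pvOuterLem (r : List Int) :
    ∀ (m i : Nat), i + m = r.length → ∀ (res : List (List Int)) (pl : List Int), pvInv r i pl →
    (((PySem.List.pyRange (i : Int) (r.length : Int) 1).foldl (pvOuter r) (res, pl)).1).map (fun eq => (eq.length : Int))
      = res.map (fun eq => (eq.length : Int))
        ++ (List.range' i m).filterMap
            (fun k => if r.getD k 0 ∈ r.take k then none else some ((r.count (r.getD k 0) : Int))) := by
  intro m
  induction m with
  | zero =>
    intro i hlen res pl hpl
    have : i = r.length := by omega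
    rw [PySem.List.pyRange_one_eq_nil (by exact_mod_cast this.ge)]
    simp
  | succ m ih =>
    intro i hlen res pl hpl
    have hi : i < r.length := by omega
    rw [PySem.List.pyRange_one_cons (by exact_mod_cast hi)]
    rw [List.foldl_cons]
    have hcast : ((i : Int) + 1) = (((i + 1 : Nat)) : Int) := by push_cast; ring
    have hgd : r.getD i 0 = r[i] := List.getD_eq_getElem r 0 hi
    have htake : r.take (i + 1) = r.take i ++ [r.getD i 0] := by
      rw [List.take_add_one, List.getElem?_eq_getElem hi, hgd]; rfl
    have hrange : List.range' i (m + 1) = i :: List.range' (i + 1) m := List.range'_succ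
    by_cases hmem : r.getD i 0 ∈ r.take i
    · -- duplicate of an earlier value: index i is already placed, skipped
      have hc : pl.contains (i : Int) = true := (hpl i).2 ⟨hi, hmem⟩
      rw [pvOuter_skip r (res, pl) (i : Int) hc]
      have hpl' : pvInv r (i + 1) pl := by
        intro jn
        rw [hpl jn, htake]
        constructor
        · rintro ⟨h1, h2⟩; exact ⟨h1, List.mem_append_left _ h2⟩
        · rintro ⟨h1, h2⟩
          rcases List.mem_append.1 h2 with h | h
          · exact ⟨h1, h⟩
          · simp only [List.mem_singleton] at h
            exact ⟨h1, h ▸ hmem⟩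
      rw [hcast, ih (i + 1) (by omega) res pl hpl', hrange, List.filterMap_cons, if_pos hmem]
    · -- first occurrence: run the inner collection loop
      have hc : pl.contains (i : Int) = false := by
        rw [Bool.eq_false_iff]
        intro h
        exact hmem ((hpl i).1 h).2
      have hfo : r.getD i 0 ∉ r.take i := hmem
      have hplin : ∀ jn : Nat, (pl ++ [(i : Int)]).contains (jn : Int) = true ↔
          (jn < r.length ∧ (r.getD jn 0 ∈ r.take i ∨ jn = i ∨ (i < jn ∧ jn < i + 1 ∧ r.getD jn 0 = r.getD i 0))) := by
        intro jn
        simp only [List.contains_append, List.contains_cons, List.contains_nil,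
          Bool.or_false, Bool.or_eq_true, beq_iff_eq, Nat.cast_inj, hpl jn]
        constructor
        · rintro (⟨h1, h2⟩ | h)
          · exact ⟨h1, Or.inl h2⟩
          · exact ⟨h ▸ hi, Or.inr (Or.inl h)⟩
        · rintro ⟨h1, h | h | ⟨a, b, c⟩⟩
          · exact Or.inl ⟨h1, h⟩
          · exact Or.inr h
          · omega
      obtain ⟨hlen1, hinv1⟩ := pvInnerLem r (r.getD i 0) i hfo
        (r.length - (i + 1)) (i + 1) (by omega) (by omega) [r.getD i 0] (pl ++ [(i : Int)]) hplin
      have hstep : pvOuter r (res, pl) (i : Int)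
          = (res ++ [(((PySem.List.pyRange ((i + 1 : Nat) : Int) (r.length : Int) 1).foldl
                (pvInner r (r.getD i 0)) ([r.getD i 0], pl ++ [(i : Int)]))).1],
             (((PySem.List.pyRange ((i + 1 : Nat) : Int) (r.length : Int) 1).foldl
                (pvInner r (r.getD i 0)) ([r.getD i 0], pl ++ [(i : Int)]))).2) := by
        rw [pvOuter_go r (res, pl) (i : Int) hc, hcast, PySem.List.pyGetD_natCast]
      rw [hstep]
      -- the new placed list satisfies the invariant for i+1
      have hpl' : pvInv r (i + 1)
          (((PySem.List.pyRange ((i + 1 : Nat) : Int) (r.length : Int) 1).foldl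
              (pvInner r (r.getD i 0)) ([r.getD i 0], pl ++ [(i : Int)]))).2 := by
        intro jn
        rw [hinv1 jn, htake]
        constructor
        · rintro ⟨h1, h | h | ⟨a, b, c⟩⟩
          · exact ⟨h1, List.mem_append_left _ h⟩
          · exact ⟨h1, List.mem_append_right _ (by rw [h]; exact List.mem_singleton_self _)⟩
          · exact ⟨h1, List.mem_append_right _ (by rw [c]; exact List.mem_singleton_self _)⟩
        · rintro ⟨h1, h2⟩
          rcases List.mem_append.1 h2 with h | h
          · exact ⟨h1, Or.inl h⟩
          · simp only [List.mem_singleton] at h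
            rcases Nat.lt_trichotomy jn i with hlt | heq | hgt
            · -- jn < i with the same value would mean the value occurs in r.take i
              have hjtk : r.getD jn 0 ∈ r.take i := by
                have hj1 : jn < (r.take i).length := by
                  rw [List.length_take]; omega
                have hj2 : (r.take i)[jn] = r[jn] := List.getElem_take
                have hj3 : r.getD jn 0 = r[jn] := List.getD_eq_getElem r 0 (by omega)
                rw [hj3, ← hj2]
                exact List.getElem_mem hj1
              exact absurd (h ▸ hjtk) hmem
            · exact ⟨h1, Or.inr (Or.inl heq)⟩
            · exact ⟨h1, Or.inr (Or.inr ⟨hgt, h1, h⟩)⟩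
      -- class size is the full count of the value in r
      have hcount : ((((PySem.List.pyRange ((i + 1 : Nat) : Int) (r.length : Int) 1).foldl
            (pvInner r (r.getD i 0)) ([r.getD i 0], pl ++ [(i : Int)]))).1.length : Int)
          = (r.count (r.getD i 0) : Int) := by
        rw [hlen1]
        have hsplit : (r.take i).count (r.getD i 0) + (r.drop i).count (r.getD i 0) = r.count (r.getD i 0) := by
          rw [← List.count_append, List.take_append_drop]
        have htk : (r.take i).count (r.getD i 0) = 0 := List.count_eq_zero.2 hmem
        have hdr : (r.drop i).count (r.getD i 0) = 1 + (r.drop (i + 1)).count (r.getD i 0) := by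
          rw [List.drop_eq_getElem_cons hi, List.count_cons]
          have hb : (r[i] == r.getD i 0) = true := by rw [beq_iff_eq, hgd]
          rw [hb, if_pos rfl]
          omega
        simp only [List.length_singleton]
        push_cast
        omega
      rw [hcast]
      rw [ih (i + 1) (by omega) _ _ hpl', hrange]
      simp only [List.map_append, List.map_cons, List.map_nil, List.filterMap_cons, hmem, if_false,
        List.append_assoc, List.singleton_append]
      rw [hcount]

-- First occurrences, scanned by index, are exactly set(r) in order.
theorem pvFo (r : List Int) :
    (List.range' 0 r.length).filterMap
        (fun k => if r.getD k 0 ∈ r.take k then none else some (r.getD k 0))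
      = PySem.Set.ofList r := by
  induction r using List.reverseRecOn with
  | nil => simp
  | append_singleton l x ihl =>
    rw [List.length_append, List.length_singleton, List.range'_concat]
    rw [List.filterMap_append]
    have hpre : (List.range' 0 l.length).filterMap
        (fun k => if (l ++ [x]).getD k 0 ∈ (l ++ [x]).take k then none else some ((l ++ [x]).getD k 0))
        = (List.range' 0 l.length).filterMap
        (fun k => if l.getD k 0 ∈ l.take k then none else some (l.getD k 0)) := by
      apply List.filterMap_congr
      intro k hk
      have hk' : k < l.length := by
        rcases List.mem_range'_1.1 hk with ⟨_, h⟩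
        omega
      rw [List.getD_append _ _ _ _ hk', List.take_append_of_le_length (by omega)]
    have hlast : (l ++ [x]).getD l.length 0 = x := by
      rw [List.getD_eq_getElem?_getD, List.getElem?_concat_length]; rfl
    have htl : (l ++ [x]).take l.length = l := List.take_left
    rw [hpre, ihl]
    have hof : PySem.Set.ofList (l ++ [x]) = (PySem.Set.ofList l).add x := by
      simp [PySem.Set.ofList_eq_foldl, List.foldl_append]
    rw [hof, PySem.Set.add]
    have hcont : (PySem.Set.ofList l).contains x = true ↔ x ∈ l := by
      simp
    simp only [zero_add, one_mul, List.filterMap_cons, hlast, htl]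
    by_cases hx : x ∈ l
    · rw [if_pos hx, if_pos (hcont.2 hx)]
      simp
    · rw [if_neg hx, if_neg (fun h => hx (hcont.1 h))]
      simp

-- A computes: for each first occurrence, the multiplicity of its value.
theorem a_eq_spec (r : List Int) :
    partition_eqclasses_size r
      = (PySem.Set.ofList r).map (fun v => (r.count v : Int)) := by
  have hport : partition_eqclasses_size r
      = (((PySem.List.pyRange ((0 : Nat) : Int) (r.length : Int) 1).foldl (pvOuter r) ([], [])).1).map
          (fun eq => (eq.length : Int)) := rfl
  rw [hport, pvOuterLem r r.length 0 (by omega) [] [] (by intro jn; simp)]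
  rw [← pvFo r, List.map_filterMap]
  simp only [List.map_nil, List.nil_append]
  apply List.filterMap_congr
  intro k _
  by_cases h : r.getD k 0 ∈ r.take k <;>
    · simp only [List.getD_eq_getElem?_getD] at h
      simp [h]

-- ===== VERDICT (by name: the statement is the Claim_ definition above) =====
theorem partition_eqclasses_size_spec : Claim_equal_partition_eqclasses_size := by
  intro r _
  unfold Spec_partition_eqclasses_size
  rw [a_eq_spec, alt_eq_spec]
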